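-- pv_equiv track=rewrite | github.com/pokes2013/git_code-learn | python/03.python操作Excel/openpyxl项目实战-考勤计算/demo005-清理重复打卡002.py | clean_attendance_records
-- ===== SOURCE A (Python) =====
-- def clean_attendance_records(time_list):
--     if len(time_list) == 0:
--         return []
--     if len(time_list) == 1:
--         return time_list
--
--     low = '11:30'
--     high = '13:00'
--     first_overall = time_list[0]
--     last_overall = time_list[-1]
--
--     interval_times = [t for t in time_list if low <= t <= high]
--
--     if not interval_times:
--         return [first_overall, last_overall]
--
--     first_interval = min(interval_times)
--     last_interval = max(interval_times)
--
--     result = [first_overall]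
--
--     if first_interval != first_overall and first_interval != last_overall:
--         result.append(first_interval)
--
--     if last_interval != last_overall and last_interval != first_interval:
--         result.append(last_interval)
--
--     result.append(last_overall)
--
--     return result
-- ===== SOURCE B (Python) =====
-- def clean_attendance_records(time_list):
--     if len(time_list) == 0:
--         return []
--     if len(time_list) == 1:
--         return time_list
--
--     first_overall = time_list[0]
--     last_overall = time_list[-1]
--
--     s = sorted(time_list)
--
--     # binary search: first index with s[idx] >= '11:30'
--     lo, hi = 0, len(s)
--     while lo < hi:
--         mid = (lo + hi) // 2
--         if s[mid] < '11:30':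
--             lo = mid + 1
--         else:
--             hi = mid
--     i = lo
--
--     # binary search: first index with s[idx] > '13:00'
--     lo, hi = i, len(s)
--     while lo < hi:
--         mid = (lo + hi) // 2
--         if s[mid] <= '13:00':
--             lo = mid + 1
--         else:
--             hi = mid
--     j = lo
--
--     if i == j:
--         return [first_overall, last_overall]
--
--     first_interval = s[i]
--     last_interval = s[j - 1]
--
--     result = [first_overall]
--     if first_interval != first_overall and first_interval != last_overall:
--         result.append(first_interval)
--     if last_interval != last_overall and last_interval != first_interval:
--         result.append(last_interval)
--     result.append(last_overall)
--     return result
-- ===== Notes on version B (the rewrite author's own statement) =====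
-- stated objective: alternative
-- what changed: B sorts the list once and locates the lunch-interval block by two hand-written binary searches (lower bound of '11:30', upper bound of '13:00') on the sorted copy, taking its boundary elements as first/last interval punch, instead of A's filtered comprehension followed by separate min() and max() scans.
import Mathlib
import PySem

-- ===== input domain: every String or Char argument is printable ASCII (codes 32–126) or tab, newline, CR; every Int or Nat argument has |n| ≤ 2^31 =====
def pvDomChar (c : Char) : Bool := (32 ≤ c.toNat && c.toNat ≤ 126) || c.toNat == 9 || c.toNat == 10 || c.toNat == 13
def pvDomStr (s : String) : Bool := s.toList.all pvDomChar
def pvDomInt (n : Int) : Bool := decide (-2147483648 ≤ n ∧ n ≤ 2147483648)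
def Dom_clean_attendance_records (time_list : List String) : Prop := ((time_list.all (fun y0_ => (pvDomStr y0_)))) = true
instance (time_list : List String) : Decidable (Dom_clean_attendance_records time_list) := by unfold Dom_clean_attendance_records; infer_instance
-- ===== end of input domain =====

-- B replaces A's filter + min() + max() by sorting once and locating the lunch-interval
-- block with two hand-written binary searches on the sorted copy (objective: alternative).

-- ===== PORT A =====
-- min(xs)/max(xs) on the nonempty interval list are ported via PySem.List.min?/max?
-- (the list is nonempty in that branch, so .getD "" is never the result).
def clean_attendance_records (time_list : List String) : List String :=
  if time_list.length = 0 then []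
  else if time_list.length = 1 then time_list
  else
    let low := "11:30"
    let high := "13:00"
    let first_overall := (PySem.List.pyGet? time_list 0).getD ""
    let last_overall := (PySem.List.pyGet? time_list (-1)).getD ""
    let interval_times := time_list.filter (fun t => low ≤ t && t ≤ high)
    if interval_times.isEmpty then [first_overall, last_overall]
    else
      let first_interval := (PySem.List.min? interval_times (fun y => y)).getD ""
      let last_interval := (PySem.List.max? interval_times (fun y => y)).getD ""
      let result := [first_overall]
      let result := if first_interval ≠ first_overall && first_interval ≠ last_overall
                    then result ++ [first_interval] else result
      let result := if last_interval ≠ last_overall && last_interval ≠ first_interval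
                    then result ++ [last_interval] else result
      result ++ [last_overall]

-- ===== PORT B =====
-- Both while-loops of Source B are the same binary-search shape, transcribed once with the
-- loop's test as a parameter; indexing s[mid] is always in range (lo ≤ mid < hi ≤ len),
-- ported as List.getD with an unused default.
def pvBisect (s : List String) (test : String → Bool) (lo hi : Nat) : Nat :=
  if h : lo < hi then
    let mid := (lo + hi) / 2
    if test (s.getD mid "") then pvBisect s test (mid + 1) hi else pvBisect s test lo mid
  else lo
termination_by hi - lo
decreasing_by all_goals omega

def clean_attendance_records_alt (time_list : List String) : List String :=
  if time_list.length = 0 then []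
  else if time_list.length = 1 then time_list
  else
    let first_overall := (PySem.List.pyGet? time_list 0).getD ""
    let last_overall := (PySem.List.pyGet? time_list (-1)).getD ""
    let s := PySem.List.sorted time_list (fun y => y) false
    let i := pvBisect s (fun t => decide (t < "11:30")) 0 s.length
    let j := pvBisect s (fun t => decide (t ≤ "13:00")) i s.length
    if i = j then [first_overall, last_overall]
    else
      let first_interval := s.getD i ""
      let last_interval := s.getD (j - 1) ""
      let result := [first_overall]
      let result := if first_interval ≠ first_overall && first_interval ≠ last_overall
                    then result ++ [first_interval] else result
      let result := if last_interval ≠ last_overall && last_interval ≠ first_interval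
                    then result ++ [last_interval] else result
      result ++ [last_overall]

-- ===== PRECONDITION & SPEC =====
def Spec_clean_attendance_records (time_list : List String) (out : List String) : Prop := out = clean_attendance_records_alt time_list
instance (time_list : List String) (out : List String) : Decidable (Spec_clean_attendance_records time_list out) := by unfold Spec_clean_attendance_records; infer_instance

-- ===== CLAIM (what is proved, stated in full; the proofs are below) =====
def Claim_equal_clean_attendance_records : Prop := ∀ (time_list : List String), Dom_clean_attendance_records time_list → Spec_clean_attendance_records time_list (clean_attendance_records time_list)

-- ===== LEMMAS AND PROOFS =====

-- the binary-search loop on a list whose `test`-region is downward closed returns the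
-- boundary index: test holds strictly below it and fails from it on
lemma pvBisect_spec (s : List String) (test : String → Bool) :
    ∀ (n lo hi : Nat), hi - lo ≤ n → lo ≤ hi → hi ≤ s.length →
    (∀ p q, p ≤ q → q < s.length → test (s.getD q "") = true → test (s.getD p "") = true) →
    (∀ k, k < lo → test (s.getD k "") = true) →
    (∀ k, hi ≤ k → k < s.length → test (s.getD k "") = false) →
    lo ≤ pvBisect s test lo hi ∧ pvBisect s test lo hi ≤ hi ∧
    (∀ k, k < pvBisect s test lo hi → test (s.getD k "") = true) ∧
    (∀ k, pvBisect s test lo hi ≤ k → k < s.length → test (s.getD k "") = false) := by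
  intro n
  induction n with
  | zero =>
      intro lo hi hn hle hhi _ hlow hhigh
      have hlh : lo = hi := by omega
      rw [pvBisect]
      simp only [show ¬ lo < hi by omega, dif_neg, not_false_iff]
      exact ⟨le_refl _, by omega, hlow, fun k hk hk2 => hhigh k (by omega) hk2⟩
  | succ n ih =>
      intro lo hi hn hle hhi hdc hlow hhigh
      by_cases hlt : lo < hi
      · rw [pvBisect]
        simp only [hlt, dif_pos]
        have hmid1 : lo ≤ (lo + hi) / 2 := by omega
        have hmid2 : (lo + hi) / 2 < hi := by omega
        by_cases ht : test (s.getD ((lo + hi) / 2) "") = true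
        · simp only [ht, if_true]
          have hlow' : ∀ k, k < (lo + hi) / 2 + 1 → test (s.getD k "") = true := by
            intro k hk
            by_cases hk2 : k < lo
            · exact hlow k hk2
            · exact hdc k ((lo + hi) / 2) (by omega) (by omega) ht
          obtain ⟨h1, h2, h3, h4⟩ := ih ((lo + hi) / 2 + 1) hi (by omega) (by omega) hhi hdc hlow' hhigh
          exact ⟨by omega, h2, h3, h4⟩
        · have htf : test (s.getD ((lo + hi) / 2) "") = false := by simpa using ht
          simp only [htf, Bool.false_eq_true, if_false]
          have hhigh' : ∀ k, (lo + hi) / 2 ≤ k → k < s.length → test (s.getD k "") = false := by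
            intro k hk hk2
            by_cases htk : test (s.getD k "") = true
            · exact absurd (hdc ((lo + hi) / 2) k hk hk2 htk) (by simpa using ht)
            · simpa using htk
          obtain ⟨h1, h2, h3, h4⟩ := ih lo ((lo + hi) / 2) (by omega) (by omega) (by omega) hdc hlow hhigh'
          exact ⟨h1, by omega, h3, h4⟩
      · rw [pvBisect]
        simp only [hlt, dif_neg, not_false_iff]
        have : lo = hi := by omega
        exact ⟨le_refl _, by omega, hlow, fun k hk hk2 => hhigh k (by omega) hk2⟩

-- on a sorted (getD-monotone) list the two searches bracket exactly the indices
-- whose element lies in ["11:30","13:00"]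
lemma pvSearch_char (s : List String)
    (hmono : ∀ p q, p ≤ q → q < s.length → s.getD p "" ≤ s.getD q "") :
    pvBisect s (fun t => decide (t < "11:30")) 0 s.length ≤
      pvBisect s (fun t => decide (t ≤ "13:00")) (pvBisect s (fun t => decide (t < "11:30")) 0 s.length) s.length ∧
    pvBisect s (fun t => decide (t ≤ "13:00")) (pvBisect s (fun t => decide (t < "11:30")) 0 s.length) s.length ≤ s.length ∧
    (∀ k, k < s.length → (((("11:30":String) ≤ s.getD k "") ∧ s.getD k "" ≤ "13:00") ↔
      (pvBisect s (fun t => decide (t < "11:30")) 0 s.length ≤ k ∧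
       k < pvBisect s (fun t => decide (t ≤ "13:00")) (pvBisect s (fun t => decide (t < "11:30")) 0 s.length) s.length))) := by
  have h1130 : ("11:30":String) ≤ "13:00" := String.le_iff_toList_le.mpr (by decide)
  set i := pvBisect s (fun t => decide (t < "11:30")) 0 s.length with hi
  set j := pvBisect s (fun t => decide (t ≤ "13:00")) i s.length with hj
  have hdc1 : ∀ p q, p ≤ q → q < s.length → decide (s.getD q "" < "11:30") = true →
      decide (s.getD p "" < "11:30") = true := by
    intro p q hpq hq hqt
    simp only [decide_eq_true_eq] at hqt ⊢
    exact lt_of_le_of_lt (hmono p q hpq hq) hqt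
  obtain ⟨hi0, hile, hlti, hgei⟩ := pvBisect_spec s (fun t => decide (t < "11:30")) s.length 0
    s.length (by omega) (Nat.zero_le _) le_rfl hdc1
    (fun k hk => absurd hk (Nat.not_lt_zero k)) (fun k hk hk2 => absurd hk2 (by omega))
  have hdc2 : ∀ p q, p ≤ q → q < s.length → decide (s.getD q "" ≤ "13:00") = true →
      decide (s.getD p "" ≤ "13:00") = true := by
    intro p q hpq hq hqt
    simp only [decide_eq_true_eq] at hqt ⊢
    exact le_trans (hmono p q hpq hq) hqt
  have hlow2 : ∀ k, k < i → decide (s.getD k "" ≤ "13:00") = true := by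
    intro k hk
    have := hlti k hk
    simp only [decide_eq_true_eq] at this ⊢
    exact le_trans (le_of_lt this) h1130
  obtain ⟨hij, hjle, hltj, hgtj⟩ := pvBisect_spec s (fun t => decide (t ≤ "13:00")) s.length i
    s.length (by omega) hile le_rfl hdc2 hlow2 (fun k hk hk2 => absurd hk2 (by omega))
  refine ⟨hij, hjle, ?_⟩
  intro k hk
  constructor
  · rintro ⟨hA, hB⟩
    constructor
    · by_contra h
      have := hlti k (by omega)
      simp only [decide_eq_true_eq] at this
      exact absurd hA (not_le_of_gt this)
    · by_contra h
      have := hgtj k (by omega) hk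
      simp only [decide_eq_false_iff_not] at this
      exact this hB
  · rintro ⟨h1, h2⟩
    have hg := hgei k h1 hk
    simp only [decide_eq_false_iff_not] at hg
    have hl := hltj k h2
    simp only [decide_eq_true_eq] at hl
    exact ⟨le_of_not_gt hg, hl⟩

-- getD form of PySem.List.sorted_id_getElem_mono
lemma sorted_getD_mono (xs : List String) (p q : Nat) (hpq : p ≤ q)
    (hq : q < (PySem.List.sorted xs (fun y => y) false).length) :
    (PySem.List.sorted xs (fun y => y) false).getD p "" ≤
      (PySem.List.sorted xs (fun y => y) false).getD q "" := by
  rw [List.getD_eq_getElem _ _ (lt_of_le_of_lt hpq hq), List.getD_eq_getElem _ _ hq]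
  exact PySem.List.sorted_id_getElem_mono xs hpq hq

-- A's min()/max() of the filtered interval list are the boundary elements s[i], s[j-1]
lemma interval_min_max (l s : List String) (i j : Nat)
    (hmono : ∀ p q, p ≤ q → q < s.length → s.getD p "" ≤ s.getD q "")
    (hmem : ∀ x, x ∈ s ↔ x ∈ l)
    (hijlt : i < j) (hjle : j ≤ s.length)
    (hchar : ∀ k, k < s.length → (((("11:30":String) ≤ s.getD k "") ∧ s.getD k "" ≤ "13:00") ↔ (i ≤ k ∧ k < j))) :
    PySem.List.min? (l.filter (fun t => ("11:30":String) ≤ t && t ≤ "13:00")) (fun y => y) = some (s.getD i "") ∧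
    PySem.List.max? (l.filter (fun t => ("11:30":String) ≤ t && t ≤ "13:00")) (fun y => y) = some (s.getD (j - 1) "") := by
  have hmemiff : ∀ x, x ∈ l.filter (fun t => ("11:30":String) ≤ t && t ≤ "13:00") ↔
      ∃ k, i ≤ k ∧ k < j ∧ s.getD k "" = x := by
    intro x
    rw [List.mem_filter]
    constructor
    · rintro ⟨hxl, hpx⟩
      simp only [Bool.and_eq_true, decide_eq_true_eq] at hpx
      obtain ⟨k, hk, hkx⟩ := List.mem_iff_getElem.mp ((hmem x).mpr hxl)
      have hgd : s.getD k "" = x := by rw [List.getD_eq_getElem _ _ hk, hkx]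
      have hc := (hchar k hk).mp (by rw [hgd]; exact hpx)
      exact ⟨k, hc.1, hc.2, hgd⟩
    · rintro ⟨k, h1, h2, h3⟩
      have hk : k < s.length := by omega
      have hx : x ∈ s := by
        rw [← h3, List.getD_eq_getElem _ _ hk]
        exact List.getElem_mem hk
      have hc := (hchar k hk).mpr ⟨h1, h2⟩
      rw [h3] at hc
      refine ⟨(hmem x).mp hx, ?_⟩
      simp only [Bool.and_eq_true, decide_eq_true_eq]
      exact hc
  have hsi : s.getD i "" ∈ l.filter (fun t => ("11:30":String) ≤ t && t ≤ "13:00") :=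
    (hmemiff _).mpr ⟨i, le_rfl, hijlt, rfl⟩
  have hsj : s.getD (j - 1) "" ∈ l.filter (fun t => ("11:30":String) ≤ t && t ≤ "13:00") :=
    (hmemiff _).mpr ⟨j - 1, by omega, by omega, rfl⟩
  constructor
  · cases hmz : PySem.List.min? (l.filter (fun t => ("11:30":String) ≤ t && t ≤ "13:00")) (fun y => y) with
    | none =>
        exact absurd ((PySem.List.min?_eq_none_iff _ _).mp hmz)
          (by intro h; rw [h] at hsi; simp at hsi)
    | some m =>
        have hmin := PySem.List.min?_isMin hmz
        obtain ⟨k, hk1, hk2, hk3⟩ := (hmemiff m).mp (PySem.List.min?_mem hmz)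
        have h2 : s.getD i "" ≤ m := by rw [← hk3]; exact hmono i k hk1 (by omega)
        exact congrArg some (le_antisymm (hmin _ hsi) h2)
  · cases hmz : PySem.List.max? (l.filter (fun t => ("11:30":String) ≤ t && t ≤ "13:00")) (fun y => y) with
    | none =>
        exact absurd ((PySem.List.max?_eq_none_iff _ _).mp hmz)
          (by intro h; rw [h] at hsj; simp at hsj)
    | some m =>
        have hmax := PySem.List.max?_isMax hmz
        obtain ⟨k, hk1, hk2, hk3⟩ := (hmemiff m).mp (PySem.List.max?_mem hmz)
        have h2 : m ≤ s.getD (j - 1) "" := by rw [← hk3]; exact hmono k (j - 1) (by omega) (by omega)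
        exact congrArg some (le_antisymm h2 (hmax _ hsj))

-- ===== VERDICT (by name: the statement is the Claim_ definition above) =====
theorem clean_attendance_records_spec : Claim_equal_clean_attendance_records := by
  intro time_list _
  show clean_attendance_records time_list = clean_attendance_records_alt time_list
  unfold clean_attendance_records clean_attendance_records_alt
  by_cases h0 : time_list.length = 0
  · simp [h0]
  by_cases h1 : time_list.length = 1
  · simp [h1]
  simp only [h0, h1, if_false]
  generalize hs : PySem.List.sorted time_list (fun y => y) false = s
  have hmono : ∀ p q, p ≤ q → q < s.length → s.getD p "" ≤ s.getD q "" := by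
    rw [← hs]; exact fun p q => sorted_getD_mono time_list p q
  have hmem : ∀ x, x ∈ s ↔ x ∈ time_list := by
    rw [← hs]; exact fun x => PySem.List.mem_sorted time_list (fun y => y) false x
  set i := pvBisect s (fun t => decide (t < "11:30")) 0 s.length with hi
  set j := pvBisect s (fun t => decide (t ≤ "13:00")) i s.length with hj
  obtain ⟨hij, hjle, hchar⟩ := pvSearch_char s hmono
  rw [← hi] at hij hjle hchar
  rw [← hj] at hij hjle hchar
  by_cases hcase : i = j
  · have hfe : time_list.filter (fun t => ("11:30":String) ≤ t && t ≤ "13:00") = [] := by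
      rw [List.filter_eq_nil_iff]
      intro a ha hpa
      simp only [Bool.and_eq_true, decide_eq_true_eq] at hpa
      obtain ⟨k, hk, hka⟩ := List.mem_iff_getElem.mp ((hmem a).mpr ha)
      have hgd : s.getD k "" = a := by rw [List.getD_eq_getElem _ _ hk, hka]
      have hc := (hchar k hk).mp (by rw [hgd]; exact hpa)
      omega
    rw [hfe]
    simp only [List.isEmpty_nil, if_true, if_pos hcase]
  · have hijlt : i < j := lt_of_le_of_ne hij hcase
    obtain ⟨hmineq, hmaxeq⟩ := interval_min_max time_list s i j hmono hmem hijlt hjle hchar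
    have hne : time_list.filter (fun t => ("11:30":String) ≤ t && t ≤ "13:00") ≠ [] := by
      intro h
      rw [(PySem.List.min?_eq_none_iff _ _).mpr h] at hmineq
      simp at hmineq
    have hie : (time_list.filter (fun t => ("11:30":String) ≤ t && t ≤ "13:00")).isEmpty = false := by
      rw [List.isEmpty_eq_false_iff]
      exact hne
    simp only [hie, Bool.false_eq_true, if_false, if_neg hcase, hmineq, hmaxeq, Option.getD_some]
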